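-- pv_equiv track=rewrite | github.com/Demi-urge/menace_sandbox | menace_sandbox/sandbox_rule_builder.py | _find_anchor_line
-- ===== SOURCE A (Python) =====
-- def _first_non_empty_line(lines: list[str]) -> str:
--     for line in lines:
--         if line.strip():
--             return line
--     return ""
--
-- def _find_anchor_line(source: str, tokens: tuple[str, ...]) -> str:
--     lines = source.splitlines()
--     if tokens:
--         lowered_tokens = tuple(token.lower() for token in tokens)
--         for line in lines:
--             lowered_line = line.lower()
--             if any(token in lowered_line for token in lowered_tokens):
--                 return line
--     fallback = _first_non_empty_line(lines)
--     if fallback: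
--         return fallback
--     return source[:1]
-- ===== SOURCE B (Python) =====
-- def _find_anchor_line(source: str, tokens: tuple[str, ...]) -> str:
--     lowered = [token.lower() for token in tokens]
--     fallback = None
--     for line in source.splitlines():
--         low = line.lower()
--         if lowered and any(tok in low for tok in lowered):
--             return line
--         if fallback is None and line.strip():
--             fallback = line
--     return fallback if fallback is not None else source[:1]
-- ===== Notes on version B (the rewrite author's own statement) =====
-- stated objective: alternative
-- what changed: Fused A's two separate traversals (token scan, then a rescan for the first non-empty line) into one single pass that records the first non-empty line as a fallback while scanning for token matches.
import Mathlib
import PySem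

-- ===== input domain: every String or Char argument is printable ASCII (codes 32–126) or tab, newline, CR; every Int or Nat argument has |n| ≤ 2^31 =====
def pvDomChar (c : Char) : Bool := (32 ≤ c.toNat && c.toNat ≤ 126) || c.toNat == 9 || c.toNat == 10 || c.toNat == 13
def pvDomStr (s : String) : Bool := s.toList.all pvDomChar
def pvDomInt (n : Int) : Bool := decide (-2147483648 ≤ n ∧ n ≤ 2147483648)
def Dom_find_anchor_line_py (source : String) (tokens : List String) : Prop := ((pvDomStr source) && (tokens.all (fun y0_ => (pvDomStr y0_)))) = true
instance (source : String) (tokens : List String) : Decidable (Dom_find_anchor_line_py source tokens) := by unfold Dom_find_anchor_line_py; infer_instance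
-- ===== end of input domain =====

-- B fuses A's two traversals (token scan, then rescan for the first non-empty line) into one pass; return values proved equal.

-- ===== PORT A =====
-- _first_non_empty_line
def first_non_empty_line (lines : List String) : String :=
  match lines with
  | [] => ""
  | line :: rest => if PySem.Str.strip line ≠ "" then line else first_non_empty_line rest

-- the 'for line in lines: … return line' token loop of A
def anchor_scan (lowered : List String) : List String → Option String
  | [] => none
  | line :: rest =>
    let loweredLine := PySem.Str.lower line
    if lowered.any (fun t => PySem.Str.isIn t loweredLine) then some line
    else anchor_scan lowered rest

def find_anchor_line_py (source : String) (tokens : List String) : String :=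
  let lines := PySem.Str.splitlines source
  let scan : Option String :=
    if tokens ≠ [] then anchor_scan (tokens.map PySem.Str.lower) lines else none
  match scan with
  | some line => line
  | none =>
    let fallback := first_non_empty_line lines
    if fallback ≠ "" then fallback else PySem.Str.slice source none (some 1)

-- ===== PORT B =====
-- B's single loop: returns the matching line, else the recorded fallback (none if never set)
def alt_loop (lowered : List String) (fallback : Option String) : List String → Option String
  | [] => fallback
  | line :: rest =>
    let low := PySem.Str.lower line
    if lowered ≠ [] ∧ lowered.any (fun t => PySem.Str.isIn t low) then some line
    else if fallback.isNone ∧ PySem.Str.strip line ≠ "" then alt_loop lowered (some line) rest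
    else alt_loop lowered fallback rest

def find_anchor_line_py_alt (source : String) (tokens : List String) : String :=
  let lowered := tokens.map PySem.Str.lower
  match alt_loop lowered none (PySem.Str.splitlines source) with
  | some line => line
  | none => PySem.Str.slice source none (some 1)

-- ===== PRECONDITION & SPEC =====
def Spec_find_anchor_line_py (source : String) (tokens : List String) (out : String) : Prop := out = find_anchor_line_py_alt source tokens
instance (source : String) (tokens : List String) (out : String) : Decidable (Spec_find_anchor_line_py source tokens out) := by unfold Spec_find_anchor_line_py; infer_instance

-- ===== CLAIM (what is proved, stated in full; the proofs are below) =====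
def Claim_equal_find_anchor_line_py : Prop := ∀ (source : String) (tokens : List String), Dom_find_anchor_line_py source tokens → Spec_find_anchor_line_py source tokens (find_anchor_line_py source tokens)

-- ===== LEMMAS AND PROOFS =====

-- optional-valued version of first_non_empty_line, the shape B's fallback takes
def opt_first (lines : List String) : Option String :=
  match lines with
  | [] => none
  | line :: rest => if PySem.Str.strip line ≠ "" then some line else opt_first rest

theorem first_eq_opt (lines : List String) :
    first_non_empty_line lines = (opt_first lines).getD "" := by
  induction lines with
  | nil => rfl
  | cons l r ih => simp only [first_non_empty_line, opt_first]; split_ifs <;> simp [ih]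

theorem opt_first_some_ne (lines : List String) (x : String)
    (h : opt_first lines = some x) : x ≠ "" := by
  induction lines with
  | nil => simp [opt_first] at h
  | cons l r ih =>
    simp only [opt_first] at h
    split_ifs at h with hs
    · cases h; intro hx; subst hx; exact hs rfl
    · exact ih h

-- B's loop, characterised: a token match wins, else the earlier of fallback / first non-empty line
theorem alt_loop_eq (lowered : List String) (hlow : lowered ≠ []) (lines : List String)
    (fb : Option String) :
    alt_loop lowered fb lines =
      match anchor_scan lowered lines with
      | some l => some l
      | none => match fb with
                | some f => some f
                | none => opt_first lines := by
  induction lines generalizing fb with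
  | nil => cases fb <;> rfl
  | cons line rest ih =>
    by_cases hany : (lowered.any fun t => PySem.Str.isIn t (PySem.Str.lower line)) = true
    · have hA : anchor_scan lowered (line :: rest) = some line := by
        simp only [anchor_scan]; rw [if_pos hany]
      rw [hA]
      simp only [alt_loop]
      rw [if_pos ⟨hlow, hany⟩]
    · have hA : anchor_scan lowered (line :: rest) = anchor_scan lowered rest := by
        simp only [anchor_scan]; rw [if_neg hany]
      rw [hA]
      simp only [alt_loop]
      rw [if_neg (fun h => hany h.2)]
      cases fb with
      | some f =>
        rw [if_neg (by simp)]
        rw [ih]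
      | none =>
        by_cases hstrip : PySem.Str.strip line ≠ ""
        · rw [if_pos ⟨rfl, hstrip⟩, ih]
          have hO : opt_first (line :: rest) = some line := by
            simp only [opt_first]; rw [if_pos hstrip]
          rw [hO]
        · rw [if_neg (fun h => hstrip h.2), ih]
          have hO : opt_first (line :: rest) = opt_first rest := by
            simp only [opt_first]; rw [if_neg hstrip]
          rw [hO]

-- with no tokens B's loop just collects the first non-empty line
theorem alt_loop_nil (lines : List String) (fb : Option String) :
    alt_loop [] fb lines =
      match fb with
      | some f => some f
      | none => opt_first lines := by
  induction lines generalizing fb with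
  | nil => cases fb <;> rfl
  | cons line rest ih =>
    simp only [alt_loop]
    rw [if_neg (fun h => h.1 rfl)]
    cases fb with
    | some f =>
      rw [if_neg (by simp)]
      rw [ih]
    | none =>
      by_cases hstrip : PySem.Str.strip line ≠ ""
      · rw [if_pos ⟨rfl, hstrip⟩, ih]
        have hO : opt_first (line :: rest) = some line := by
          simp only [opt_first]; rw [if_pos hstrip]
        rw [hO]
      · rw [if_neg (fun h => hstrip h.2), ih]
        have hO : opt_first (line :: rest) = opt_first rest := by
          simp only [opt_first]; rw [if_neg hstrip]
        rw [hO]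

-- the shared tail: fallback-or-first-character, equal on both sides
theorem tail_eq (source : String) (lines : List String) :
    (let fallback := first_non_empty_line lines
     if fallback ≠ "" then fallback else PySem.Str.slice source none (some 1)) =
    (match opt_first lines with
     | some l => l
     | none => PySem.Str.slice source none (some 1)) := by
  rw [first_eq_opt]
  cases h : opt_first lines with
  | none => simp
  | some x =>
    have := opt_first_some_ne lines x h
    simp [this]

-- ===== VERDICT (by name: the statement is the Claim_ definition above) =====
theorem find_anchor_line_py_spec : Claim_equal_find_anchor_line_py := by
  intro source tokens _
  unfold Spec_find_anchor_line_py find_anchor_line_py find_anchor_line_py_alt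
  by_cases htok : tokens = []
  · subst htok
    simp only [List.map_nil, alt_loop_nil, ne_eq, not_true_eq_false, if_false]
    exact tail_eq source _
  · have hlow : tokens.map PySem.Str.lower ≠ [] := by simpa using htok
    simp only [ne_eq, htok, not_false_eq_true, if_true]
    rw [alt_loop_eq _ hlow]
    cases h : anchor_scan (tokens.map PySem.Str.lower) (PySem.Str.splitlines source) with
    | some l => simp
    | none => simpa using tail_eq source (PySem.Str.splitlines source)
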